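-- pv_equiv track=rewrite | github.com/dmarek03/ALGORITHM_AND_DATA_STRUCTURE | dynamic_programming/tank.py | get_solution
-- ===== SOURCE A (Python) =====
-- def get_solution(S, P, F, i):
--     res = []
--
--     for j in range(i - 1, -1, -1):
--         if F[j] < F[i]:
--             res.append((i, S[i] - S[j], F[i] - F[j], P[i]))
--             i = j
--
--     res.append((i, S[i], F[i], P[i]))
--
--     return res[::-1]
-- ===== SOURCE B (Python) =====
-- def get_solution(S, P, F, i):
--     # Forward monotone-stack reconstruction: one left-to-right pass keeps the
--     # strict suffix-minima chain on a stack (ascending), then emits the tuples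
--     # by pairing consecutive chain indices -- no backward scan, no reversal.
--     stack = []
--     for j in range(i):
--         while stack and F[stack[-1]] >= F[j]:
--             stack.pop()
--         stack.append(j)
--     while stack and F[stack[-1]] >= F[i]:
--         stack.pop()
--     stack.append(i)
--     c0 = stack[0]
--     res = [(c0, S[c0], F[c0], P[c0])]
--     for a, b in zip(stack, stack[1:]):
--         res.append((b, S[b] - S[a], F[b] - F[a], P[b]))
--     return res
-- ===== Notes on version B (the rewrite author's own statement) =====
-- stated objective: alternative
-- what changed: A reconstructs the chain by a backward scan that interleaves tuple construction and finally reverses the list; B makes one forward left-to-right pass maintaining the strict suffix-minima chain on a monotone stack and then emits the tuples by pairing consecutive chain indices, so no backward scan and no reversal.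
import Mathlib
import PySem

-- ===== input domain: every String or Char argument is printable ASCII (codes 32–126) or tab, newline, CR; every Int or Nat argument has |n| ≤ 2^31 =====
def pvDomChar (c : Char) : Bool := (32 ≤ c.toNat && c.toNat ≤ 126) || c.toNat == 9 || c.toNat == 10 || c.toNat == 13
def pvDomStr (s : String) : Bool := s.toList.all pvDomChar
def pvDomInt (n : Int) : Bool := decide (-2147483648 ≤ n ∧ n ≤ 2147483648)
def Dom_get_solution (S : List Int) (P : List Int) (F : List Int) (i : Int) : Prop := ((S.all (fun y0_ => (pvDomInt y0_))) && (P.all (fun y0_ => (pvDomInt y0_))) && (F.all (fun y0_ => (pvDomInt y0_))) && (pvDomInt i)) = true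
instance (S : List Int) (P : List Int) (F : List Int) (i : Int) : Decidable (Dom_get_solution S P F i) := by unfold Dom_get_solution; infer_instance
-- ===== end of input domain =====

-- B replaces A's backward scan + final reversal by a forward monotone-stack pass
-- that keeps the strict suffix-minima chain and pairs consecutive chain indices
-- (objective: alternative algorithm of the same cost).

-- ===== PORT A =====
-- xs[k] (possibly negative index); Pre_ guarantees every access is in range, so the
-- default 0 is never used on admitted inputs.
def pvGetI (xs : List Int) (k : Int) : Int := (PySem.List.pyGet? xs k).getD 0

-- the body of A's 'for j in range(i-1,-1,-1)' loop: state = (res, current i)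
def pvStepA (S : List Int) (P : List Int) (F : List Int)
    (st : List (Int × Int × Int × Int) × Int) (j : Int) :
    List (Int × Int × Int × Int) × Int :=
  if pvGetI F j < pvGetI F st.2 then
    (st.1 ++ [(st.2, pvGetI S st.2 - pvGetI S j, pvGetI F st.2 - pvGetI F j, pvGetI P st.2)], j)
  else st

def get_solution (S : List Int) (P : List Int) (F : List Int) (i : Int) :
    List (Int × Int × Int × Int) :=
  let r := (PySem.List.pyRange (i - 1) (-1) (-1)).foldl (pvStepA S P F) ([], i)
  ((r.1 ++ [(r.2, pvGetI S r.2, pvGetI F r.2, pvGetI P r.2)]).reverse)  -- res.append(...); res[::-1]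

-- ===== PORT B =====
-- 'while stack and F[stack[-1]] >= t: stack.pop()' — drop the longest suffix whose F is ≥ t
def pvPopGE (F : List Int) (t : Int) (st : List Int) : List Int :=
  (st.reverse.dropWhile (fun x => decide (t ≤ pvGetI F x))).reverse

-- one iteration of B's stack loop: pop then append j
def pvPush (F : List Int) (st : List Int) (j : Int) : List Int :=
  pvPopGE F (pvGetI F j) st ++ [j]

-- phase 2 of B: base tuple at stack[0], then one tuple per consecutive pair (zip)
def pvEmit (S : List Int) (P : List Int) (F : List Int) (st : List Int) :
    List (Int × Int × Int × Int) :=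
  match st with
  | [] => []
  | c0 :: rest =>
      (c0, pvGetI S c0, pvGetI F c0, pvGetI P c0) ::
        ((c0 :: rest).zip rest).map
          (fun ab => (ab.2, pvGetI S ab.2 - pvGetI S ab.1, pvGetI F ab.2 - pvGetI F ab.1, pvGetI P ab.2))

def get_solution_alt (S : List Int) (P : List Int) (F : List Int) (i : Int) :
    List (Int × Int × Int × Int) :=
  let st0 := (PySem.List.pyRange 0 i 1).foldl (pvPush F) []
  pvEmit S P F (pvPush F st0 i)

-- ===== PRECONDITION & SPEC =====
-- Exactly the inputs on which the Python A returns normally: the original index i must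
-- be a valid (possibly negative) index into S, P and F; then every index the loop
-- touches is in range as well.
def Pre_get_solution (S : List Int) (P : List Int) (F : List Int) (i : Int) : Prop :=
  PySem.Raise.InRange S.length i ∧ PySem.Raise.InRange P.length i ∧ PySem.Raise.InRange F.length i
instance (S : List Int) (P : List Int) (F : List Int) (i : Int) : Decidable (Pre_get_solution S P F i) := by unfold Pre_get_solution; infer_instance

def pvWitness_get_solution : List Int × List Int × List Int × Int := ([1, 2], [3, 4], [0, 5], 1)

def Spec_get_solution (S : List Int) (P : List Int) (F : List Int) (i : Int) (out : List (Int × Int × Int × Int)) : Prop := out = get_solution_alt S P F i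
instance (S : List Int) (P : List Int) (F : List Int) (i : Int) (out : List (Int × Int × Int × Int)) : Decidable (Spec_get_solution S P F i out) := by unfold Spec_get_solution; infer_instance

-- ===== CLAIM (what is proved, stated in full; the proofs are below) =====
def Claim_equal_get_solution : Prop := ∀ (S : List Int) (P : List Int) (F : List Int) (i : Int), Dom_get_solution S P F i → Pre_get_solution S P F i → Spec_get_solution S P F i (get_solution S P F i)

-- ===== LEMMAS AND PROOFS =====

-- the ascending predecessor chain ending at i, scanning indices m-1 … 0
def pvChain (F : List Int) : Nat → Int → List Int
  | 0, i => [i]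
  | m + 1, i => if pvGetI F (m : Int) < pvGetI F i then pvChain F m (m : Int) ++ [i] else pvChain F m i

theorem pvChain_getLast? (F : List Int) (m : Nat) (i : Int) :
    (pvChain F m i).getLast? = some i := by
  induction m generalizing i with
  | zero => simp [pvChain]
  | succ m ih => by_cases h : pvGetI F (m : Int) < pvGetI F i <;> simp [pvChain, h, ih]

theorem pvZipMap_concat (S P F : List Int) :
    ∀ (rest : List Int) (c0 a y : Int), (c0 :: rest).getLast? = some a →
    ((c0 :: rest ++ [y]).zip (rest ++ [y])).map
        (fun ab => (ab.2, pvGetI S ab.2 - pvGetI S ab.1, pvGetI F ab.2 - pvGetI F ab.1, pvGetI P ab.2))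
      = ((c0 :: rest).zip rest).map
          (fun ab => (ab.2, pvGetI S ab.2 - pvGetI S ab.1, pvGetI F ab.2 - pvGetI F ab.1, pvGetI P ab.2)) ++
        [(y, pvGetI S y - pvGetI S a, pvGetI F y - pvGetI F a, pvGetI P y)] := by
  intro rest
  induction rest with
  | nil => intro c0 a y h; simp at h; subst h; simp
  | cons b rs ih =>
      intro c0 a y h
      have h' : (b :: rs).getLast? = some a := by simpa using h
      simpa using ih b a y h'

theorem pvEmit_concat (S P F : List Int) (c0 : Int) (rest : List Int) (a y : Int)
    (h : (c0 :: rest).getLast? = some a) :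
    pvEmit S P F ((c0 :: rest) ++ [y]) =
      pvEmit S P F (c0 :: rest) ++
        [(y, pvGetI S y - pvGetI S a, pvGetI F y - pvGetI F a, pvGetI P y)] := by
  simp only [pvEmit, List.cons_append]
  rw [show c0 :: (rest ++ [y]) = c0 :: rest ++ [y] by simp]
  rw [pvZipMap_concat S P F rest c0 a y h]

theorem foldA (S P F : List Int) (m : Nat) :
    ∀ (i : Int) (acc : List (Int × Int × Int × Int)),
    (let r := (PySem.List.pyRange ((m : Int) - 1) (-1) (-1)).foldl (pvStepA S P F) (acc, i)
     (r.1 ++ [(r.2, pvGetI S r.2, pvGetI F r.2, pvGetI P r.2)]).reverse)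
      = pvEmit S P F (pvChain F m i) ++ acc.reverse := by
  induction m with
  | zero =>
      intro i acc
      rw [PySem.List.pyRange_neg_one_eq_nil (by norm_num)]
      simp [pvChain, pvEmit]
  | succ m ih =>
      intro i acc
      have hr : PySem.List.pyRange (((m : Nat) + 1 : Int) - 1) (-1) (-1)
          = (m : Int) :: PySem.List.pyRange ((m : Int) - 1) (-1) (-1) := by
        have : (((m : Nat) + 1 : Int) - 1) = (m : Int) := by omega
        rw [this]
        exact PySem.List.pyRange_neg_one_cons (by omega)
      push_cast at hr ⊢
      rw [hr]
      simp only [List.foldl_cons]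
      by_cases h : pvGetI F (m : Int) < pvGetI F i
      · have hstep : pvStepA S P F (acc, i) (m : Int)
            = (acc ++ [(i, pvGetI S i - pvGetI S (m : Int), pvGetI F i - pvGetI F (m : Int), pvGetI P i)], (m : Int)) := by
          simp [pvStepA, h]
        rw [hstep, ih (m : Int)]
        rw [show pvChain F (m + 1) i = pvChain F m (m : Int) ++ [i] by simp [pvChain, h]]
        obtain ⟨c0, rest, hc⟩ : ∃ c0 rest, pvChain F m (m : Int) = c0 :: rest := by
          cases hx : pvChain F m (m : Int) with
          | nil => exact absurd (hx ▸ pvChain_getLast? F m (m : Int)) (by simp)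
          | cons c0 rest => exact ⟨c0, rest, rfl⟩
        have hlast : (c0 :: rest).getLast? = some (m : Int) := hc ▸ pvChain_getLast? F m (m : Int)
        rw [hc, pvEmit_concat S P F c0 rest (m : Int) i hlast]
        simp
      · have hstep : pvStepA S P F (acc, i) (m : Int) = (acc, i) := by
          simp [pvStepA, h]
        rw [hstep, ih i]
        rw [show pvChain F (m + 1) i = pvChain F m i by simp [pvChain, h]]

def pvIncr (F : List Int) (a b : Int) : Prop := pvGetI F a < pvGetI F b

theorem popGE_eq_filter (F : List Int) (t : Int) (st : List Int)
    (h : st.Pairwise (pvIncr F)) :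
    pvPopGE F t st = st.filter (fun x => decide (pvGetI F x < t)) := by
  induction st using List.reverseRecOn with
  | nil => simp [pvPopGE]
  | append_singleton ys y ih =>
      have hys : ys.Pairwise (pvIncr F) := (List.pairwise_append.mp h).1
      have hall : ∀ x ∈ ys, pvIncr F x y := by
        intro x hx
        exact (List.pairwise_append.mp h).2.2 x hx y (by simp)
      by_cases hy : t ≤ pvGetI F y
      · have : pvPopGE F t (ys ++ [y]) = pvPopGE F t ys := by
          simp [pvPopGE, hy]
        rw [this, ih hys]
        simp [List.filter_append, show ¬ (pvGetI F y < t) by omega]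
      · have : pvPopGE F t (ys ++ [y]) = ys ++ [y] := by
          simp [pvPopGE, show ¬ (t ≤ pvGetI F y) by omega]
        rw [this]
        rw [List.filter_append]
        have h1 : ys.filter (fun x => decide (pvGetI F x < t)) = ys := by
          apply List.filter_eq_self.mpr
          intro x hx
          have := hall x hx
          unfold pvIncr at this
          simp; omega
        simp [h1, show pvGetI F y < t by omega]

theorem pairwise_push (F : List Int) (st : List Int) (j : Int)
    (h : st.Pairwise (pvIncr F)) : (pvPush F st j).Pairwise (pvIncr F) := by
  unfold pvPush
  rw [popGE_eq_filter F _ st h]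
  apply List.pairwise_append.mpr
  refine ⟨h.filter _, by simp, ?_⟩
  intro x hx y hy
  simp at hy; subst hy
  have := List.of_mem_filter hx
  simp at this
  exact this

-- the stack after the forward loop over range(0, m)
def pvSM (F : List Int) (m : Nat) : List Int :=
  (PySem.List.pyRange 0 (m : Int) 1).foldl (pvPush F) []

theorem pvSM_succ (F : List Int) (m : Nat) :
    pvSM F (m + 1) = pvPush F (pvSM F m) (m : Int) := by
  unfold pvSM
  rw [Nat.cast_add, Nat.cast_one,
      PySem.List.pyRange_one_succ_right (by positivity : (0:Int) ≤ (m : Int))]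
  simp

theorem pvSM_pairwise (F : List Int) (m : Nat) : (pvSM F m).Pairwise (pvIncr F) := by
  induction m with
  | zero => simp [pvSM, PySem.List.pyRange]
  | succ m ih => rw [pvSM_succ]; exact pairwise_push F _ _ ih

theorem chain_eq_filter (F : List Int) (m : Nat) :
    ∀ i : Int, pvChain F m i = (pvSM F m).filter (fun x => decide (pvGetI F x < pvGetI F i)) ++ [i] := by
  induction m with
  | zero =>
      intro i
      simp [pvChain, pvSM, PySem.List.pyRange]
  | succ m ih =>
      intro i
      rw [pvSM_succ, pvPush, popGE_eq_filter F _ _ (pvSM_pairwise F m), List.filter_append]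
      by_cases h : pvGetI F (m : Int) < pvGetI F i
      · rw [show pvChain F (m + 1) i = pvChain F m (m : Int) ++ [i] by simp [pvChain, h], ih (m : Int)]
        have h2 : ((pvSM F m).filter (fun x => decide (pvGetI F x < pvGetI F (m : Int)))).filter
            (fun x => decide (pvGetI F x < pvGetI F i))
            = (pvSM F m).filter (fun x => decide (pvGetI F x < pvGetI F (m : Int))) := by
          apply List.filter_eq_self.mpr
          intro x hx
          have := List.of_mem_filter hx
          simp at this ⊢
          omega
        simp [h, h2]
      · rw [show pvChain F (m + 1) i = pvChain F m i by simp [pvChain, h], ih i]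
        have h2 : ((pvSM F m).filter (fun x => decide (pvGetI F x < pvGetI F (m : Int)))).filter
            (fun x => decide (pvGetI F x < pvGetI F i))
            = (pvSM F m).filter (fun x => decide (pvGetI F x < pvGetI F i)) := by
          rw [List.filter_filter]
          apply List.filter_congr
          intro x _
          simp
          omega
        simp [h, h2]

theorem main_eq (S P F : List Int) (i : Int) :
    get_solution S P F i = get_solution_alt S P F i := by
  by_cases hi : 0 ≤ i
  · obtain ⟨m, rfl⟩ : ∃ m : Nat, i = (m : Int) := ⟨i.toNat, by omega⟩
    have hB : get_solution_alt S P F (m : Int) = pvEmit S P F (pvPush F (pvSM F m) (m : Int)) := rfl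
    have hA : get_solution S P F (m : Int) = pvEmit S P F (pvChain F m (m : Int)) := by
      unfold get_solution
      simpa using foldA S P F m (m : Int) []
    have hchain : pvPush F (pvSM F m) (m : Int) = pvChain F m (m : Int) := by
      rw [chain_eq_filter F m (m : Int), pvPush,
          popGE_eq_filter F _ _ (pvSM_pairwise F m)]
    rw [hA, hB, hchain]
  · unfold get_solution get_solution_alt
    rw [PySem.List.pyRange_neg_one_eq_nil (by omega),
        show PySem.List.pyRange 0 i 1 = [] from by
          rw [PySem.List.pyRange_one]; simp; omega]
    simp [pvPush, pvPopGE, pvEmit]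

-- ===== VERDICT (by name: the statement is the Claim_ definition above) =====
theorem get_solution_spec : Claim_equal_get_solution := by
  intro S P F i _ _
  unfold Spec_get_solution
  exact main_eq S P F i
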